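-- pv_equiv track=rewrite | github.com/ayukyo/alltoolkit | Python/table_utils/mod.py | column_widths
-- ===== SOURCE A (Python) =====
-- from typing import Union, List, Tuple, Optional, Dict, Any, Callable, Iterator
--
-- def column_widths(rows: List[List[str]], min_width: int = 1) -> List[int]:
--     """
--     Calculate column widths for data.
--
--     Args:
--         rows: Data rows
--         min_width: Minimum width per column
--
--     Returns:
--         List of column widths
--     """
--     if not rows:
--         return []
--
--     num_cols = max(len(row) for row in rows)
--     widths = [min_width] * num_cols
--
--     for row in rows:
--         for i, cell in enumerate(row):
--             widths[i] = max(widths[i], len(str(cell)))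
--
--     return widths
-- ===== SOURCE B (Python) =====
-- def column_widths(rows, min_width=1):
--     if not rows:
--         return []
--     num_cols = max(len(row) for row in rows)
--     # column-major: one whole column at a time, no indexed accumulator
--     return [max([min_width] + [len(row[j]) for row in rows if j < len(row)])
--             for j in range(num_cols)]
-- ===== Notes on version B (the rewrite author's own statement) =====
-- stated objective: idiomatic
-- what changed: Replaces A's row-major cell-by-cell updates of an indexed widths accumulator with a column-major comprehension that computes each column's width as one max over that column's cells.
import Mathlib
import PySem

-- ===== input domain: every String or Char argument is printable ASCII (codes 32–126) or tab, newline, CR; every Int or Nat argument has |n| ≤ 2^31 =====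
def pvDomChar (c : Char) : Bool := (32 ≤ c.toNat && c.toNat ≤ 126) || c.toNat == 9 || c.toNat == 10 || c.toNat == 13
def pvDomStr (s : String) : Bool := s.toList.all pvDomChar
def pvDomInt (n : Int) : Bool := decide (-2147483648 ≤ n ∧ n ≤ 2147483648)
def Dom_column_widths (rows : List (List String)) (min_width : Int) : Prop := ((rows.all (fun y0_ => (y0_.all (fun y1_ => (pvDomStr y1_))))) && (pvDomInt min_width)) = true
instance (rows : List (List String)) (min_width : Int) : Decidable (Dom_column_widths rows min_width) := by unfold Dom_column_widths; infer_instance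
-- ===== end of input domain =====

-- B recomputes each column width column-major (one max per column) instead of A's
-- cell-by-cell updates of an indexed widths accumulator; objective: more idiomatic, same cost.

-- ===== PORT A =====
-- row-major: widths accumulator updated cell by cell via enumerate
def column_widths (rows : List (List String)) (min_width : Int) : List Int :=
  if rows = [] then []
  else
    let num_cols : Int :=
      (PySem.List.max? (rows.map (fun row => PySem.List.len row)) (fun x => x)).getD 0
    let widths := PySem.List.pyRepeat [min_width] num_cols
    rows.foldl (fun widths row =>
      (PySem.List.enumerate row 0).foldl (fun w p =>
        PySem.List.pySetD w p.1 (max (PySem.List.pyGetD w p.1 0) (PySem.Str.len p.2))) widths)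
      widths

-- ===== PORT B =====
-- column-major: one max per column over the cells that column has
def column_widths_alt (rows : List (List String)) (min_width : Int) : List Int :=
  if rows = [] then []
  else
    let num_cols : Int :=
      (PySem.List.max? (rows.map (fun row => PySem.List.len row)) (fun x => x)).getD 0
    (PySem.List.pyRange 0 num_cols 1).map (fun j =>
      (PySem.List.max?
        (min_width :: rows.filterMap (fun row =>
          if j < PySem.List.len row then some (PySem.Str.len (PySem.List.pyGetD row j "")) else none))
        (fun x => x)).getD 0)

-- ===== PRECONDITION & SPEC =====
def Spec_column_widths (rows : List (List String)) (min_width : Int) (out : List Int) : Prop := out = column_widths_alt rows min_width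
instance (rows : List (List String)) (min_width : Int) (out : List Int) : Decidable (Spec_column_widths rows min_width out) := by unfold Spec_column_widths; infer_instance

-- ===== CLAIM (what is proved, stated in full; the proofs are below) =====
def Claim_equal_column_widths : Prop := ∀ (rows : List (List String)) (min_width : Int), Dom_column_widths rows min_width → Spec_column_widths rows min_width (column_widths rows min_width)

-- ===== LEMMAS AND PROOFS =====

-- the per-column combining step both proofs reduce to
def cwStep (j : Nat) (acc : Int) (row : List String) : Int :=
  if j < row.length then max acc (PySem.Str.len (row.getD j "")) else acc

lemma cw_col_spec (rows : List (List String)) (j : Nat) (acc : Int) :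
    (rows.filterMap (fun row =>
      if (j:Int) < PySem.List.len row then some (PySem.Str.len (PySem.List.pyGetD row (j:Int) "")) else none)).foldl max acc
    = rows.foldl (cwStep j) acc := by
  induction rows generalizing acc with
  | nil => rfl
  | cons r rs ih =>
    simp only [PySem.List.len_eq, PySem.List.pyGetD_natCast] at ih
    simp only [List.filterMap_cons, PySem.List.len_eq, PySem.List.pyGetD_natCast]
    by_cases h : j < r.length
    · rw [if_pos (by exact_mod_cast h)]
      simp only [List.foldl_cons, cwStep, if_pos h]
      exact ih _
    · rw [if_neg (by exact_mod_cast h)]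
      simp only [List.foldl_cons, cwStep, if_neg h]
      exact ih _

lemma cw_getD_set (w:List Int)(s j:Nat)(v:Int)(h:s<w.length) :
    (w.set s v).getD j 0 = if s = j then v else w.getD j 0 := by
  by_cases hj : j < w.length
  · simp [List.getD_eq_getElem?_getD, hj]
    split_ifs <;> simp_all
  · have : ¬ s = j := by omega
    simp [List.getD_eq_getElem?_getD, this]

lemma cw_inner_spec (row : List String) (s : Nat) (w : List Int)
    (hle : s + row.length ≤ w.length) :
    (((PySem.List.enumerate row (s:Int)).foldl (fun w p =>
        PySem.List.pySetD w p.1 (max (PySem.List.pyGetD w p.1 0) (PySem.Str.len p.2))) w).length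
        = w.length)
    ∧ ∀ j : Nat,
      ((PySem.List.enumerate row (s:Int)).foldl (fun w p =>
        PySem.List.pySetD w p.1 (max (PySem.List.pyGetD w p.1 0) (PySem.Str.len p.2))) w).getD j 0
      = if s ≤ j ∧ j < s + row.length then max (w.getD j 0) (PySem.Str.len (row.getD (j - s) ""))
        else w.getD j 0 := by
  induction row generalizing s w with
  | nil =>
    constructor
    · rfl
    · intro j
      have h0 : ¬ (s ≤ j ∧ j < s + List.length ([] : List String)) := by simp
      rw [if_neg h0]
      rfl
  | cons c t ih =>
    simp only [List.length_cons] at hle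
    have hcons : PySem.List.enumerate (c::t) (s:Int)
        = ((s:Int),c) :: PySem.List.enumerate t ((s:Int)+1) := rfl
    have hs1 : ((s:Int)+1) = ((s+1 : Nat):Int) := by push_cast; ring
    set w' := w.set s (max (w.getD s 0) (PySem.Str.len c)) with hw'
    have hstep : PySem.List.pySetD w (s:Int) (max (PySem.List.pyGetD w (s:Int) 0) (PySem.Str.len c)) = w' := by
      simp [hw']
    have hlen' : w'.length = w.length := by simp [hw']
    have hle' : (s+1) + t.length ≤ w'.length := by rw [hlen']; omega
    obtain ⟨ihlen, ihget⟩ := ih (s+1) w' hle'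
    rw [hcons]
    simp only [List.foldl_cons, hs1, hstep]
    refine ⟨by rw [ihlen, hlen'], ?_⟩
    intro j
    rw [ihget j]
    have hsw : s < w.length := by omega
    by_cases h1 : s + 1 ≤ j ∧ j < (s+1) + t.length
    · rw [if_pos h1, if_pos (by simp only [List.length_cons]; omega)]
      have hne : ¬ s = j := by omega
      rw [hw', cw_getD_set w s j _ hsw, if_neg hne]
      have : (c::t).getD (j - s) "" = t.getD (j - (s+1)) "" := by
        have : j - s = (j - (s+1)) + 1 := by omega
        simp [this]
      rw [this]
    · rw [if_neg h1]
      by_cases h2 : s ≤ j ∧ j < s + (c::t).length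
      · have hj : j = s := by simp only [List.length_cons] at h2; omega
        rw [if_pos h2, hw', cw_getD_set w s j _ hsw, if_pos hj.symm]
        subst hj
        simp
      · rw [if_neg h2, hw', cw_getD_set w s j _ hsw, if_neg (by simp only [List.length_cons, not_and, not_lt] at h2; omega)]

lemma cw_outer_spec (rows : List (List String)) (w : List Int)
    (h : ∀ r ∈ rows, r.length ≤ w.length) :
    ((rows.foldl (fun widths row =>
      (PySem.List.enumerate row 0).foldl (fun w p =>
        PySem.List.pySetD w p.1 (max (PySem.List.pyGetD w p.1 0) (PySem.Str.len p.2))) widths) w).length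
      = w.length)
    ∧ ∀ j : Nat,
      (rows.foldl (fun widths row =>
        (PySem.List.enumerate row 0).foldl (fun w p =>
          PySem.List.pySetD w p.1 (max (PySem.List.pyGetD w p.1 0) (PySem.Str.len p.2))) widths) w).getD j 0
      = rows.foldl (cwStep j) (w.getD j 0) := by
  induction rows generalizing w with
  | nil => exact ⟨rfl, fun j => rfl⟩
  | cons r rs ih =>
    have hr : r.length ≤ w.length := h r (by simp)
    obtain ⟨ilen, iget⟩ := cw_inner_spec r 0 w (by omega)
    simp only [Nat.cast_zero] at ilen iget
    set w1 := (PySem.List.enumerate r (0:Int)).foldl (fun w p =>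
        PySem.List.pySetD w p.1 (max (PySem.List.pyGetD w p.1 0) (PySem.Str.len p.2))) w with hw1
    have hlen1 : w1.length = w.length := ilen
    obtain ⟨olen, oget⟩ := ih w1 (fun r hr' => by rw [hlen1]; exact h r (by simp [hr']))
    constructor
    · simp only [List.foldl_cons]
      rw [← hw1, olen, hlen1]
    · intro j
      simp only [List.foldl_cons]
      rw [← hw1, oget j]
      congr 1
      rw [hw1, iget j]
      simp [cwStep]

lemma cw_main (rows : List (List String)) (min_width : Int) (hrows : rows ≠ []) :
    (let num_cols : Int :=
      (PySem.List.max? (rows.map (fun row => PySem.List.len row)) (fun x => x)).getD 0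
     let widths := PySem.List.pyRepeat [min_width] num_cols
     rows.foldl (fun widths row =>
      (PySem.List.enumerate row 0).foldl (fun w p =>
        PySem.List.pySetD w p.1 (max (PySem.List.pyGetD w p.1 0) (PySem.Str.len p.2))) widths)
      widths)
    = (let num_cols : Int :=
      (PySem.List.max? (rows.map (fun row => PySem.List.len row)) (fun x => x)).getD 0
      (PySem.List.pyRange 0 num_cols 1).map (fun j =>
      (PySem.List.max?
        (min_width :: rows.filterMap (fun row =>
          if j < PySem.List.len row then some (PySem.Str.len (PySem.List.pyGetD row j "")) else none))
        (fun x => x)).getD 0)) := by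
  obtain ⟨r, rs, rfl⟩ := List.exists_cons_of_ne_nil hrows
  simp only
  set M : Int := (PySem.List.max? (((r::rs)).map (fun row => PySem.List.len row)) (fun x => x)).getD 0 with hM
  have hMfold : M = (rs.map (fun row => PySem.List.len row)).foldl max (PySem.List.len r) := by
    rw [hM, List.map_cons, PySem.List.max?_id_cons]; rfl
  have hbound : ∀ ρ ∈ (r::rs), PySem.List.len ρ ≤ M := by
    intro ρ hρ
    rw [hMfold]
    rcases List.mem_cons.mp hρ with h'|h'
    · subst h'; exact (PySem.List.le_foldl_max _ _).1
    · exact (PySem.List.le_foldl_max _ _).2 _ (List.mem_map_of_mem h')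
  have hM0 : 0 ≤ M := le_trans (by simp [PySem.List.len_eq]) (hbound r (by simp))
  set N := M.toNat with hN
  have hMN : M = (N:Int) := by omega
  have hbN : ∀ ρ ∈ (r::rs), ρ.length ≤ N := by
    intro ρ hρ
    have := hbound ρ hρ
    rw [PySem.List.len_eq, hMN] at this
    exact_mod_cast this
  have hrep : PySem.List.pyRepeat [min_width] M = List.replicate N min_width := by
    rw [PySem.List.pyRepeat_singleton, hN]
  have hrlen : (List.replicate N min_width).length = N := by simp
  obtain ⟨alen, aget⟩ := cw_outer_spec (r::rs) (List.replicate N min_width)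
    (fun ρ hρ => by rw [hrlen]; exact hbN ρ hρ)
  rw [hrep]
  rw [hMN, PySem.List.pyRange_zero_natCast]
  rw [List.map_map]
  apply List.ext_getElem
  · rw [alen, hrlen]; simp
  · intro j hj1 hj2
    have hjN : j < N := by rw [alen, hrlen] at hj1; exact hj1
    have hA : _ = _ := aget j
    rw [List.getD_eq_getElem _ _ hj1] at hA
    rw [hA]
    rw [List.getElem_map, List.getElem_range]
    simp only [Function.comp]
    rw [PySem.List.max?_id_cons, Option.getD_some]
    rw [cw_col_spec (r::rs) j min_width]
    rw [List.getD_replicate]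
    exact hjN

-- ===== VERDICT (by name: the statement is the Claim_ definition above) =====
theorem column_widths_spec : Claim_equal_column_widths := by
  intro rows min_width _
  unfold Spec_column_widths
  by_cases h : rows = []
  · subst h; rfl
  · show column_widths rows min_width = column_widths_alt rows min_width
    unfold column_widths column_widths_alt
    rw [if_neg h, if_neg h]
    exact cw_main rows min_width h
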